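-- pv_equiv track=rewrite | github.com/Tarunvetsa/Pyjamask128-Client_Server | encryption-pm.py | circulant
-- ===== SOURCE A (Python) =====
-- def circulant( arr,  n):
--
--     c = [[0 for i in range(n)] for j in range(n)]
--     for k in range(n):
--         c[k][0] = arr[k]
--
--     for  i in range(1,n):
--         for j in range(n):
--             if (j - 1 >= 0):
--                 c[j][i] = c[j - 1][i - 1]
--             else:
--                 c[j][i] = c[n - 1][i - 1]
--
--
--     result = [[c[j][i] for j in range(len(c))] for i in range(len(c[0]))]
--
--     return result
-- ===== SOURCE B (Python) =====
-- def circulant(arr, n):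
--     return [[arr[(j - i) % n] for j in range(n)] for i in range(n)]
-- ===== Notes on version B (the rewrite author's own statement) =====
-- stated objective: simpler
-- what changed: B builds each row directly from the closed form M[i][j] = arr[(j - i) % n], replacing A's zero matrix, column-by-column shift recurrence and final transpose with a single nested comprehension.
import Mathlib
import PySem

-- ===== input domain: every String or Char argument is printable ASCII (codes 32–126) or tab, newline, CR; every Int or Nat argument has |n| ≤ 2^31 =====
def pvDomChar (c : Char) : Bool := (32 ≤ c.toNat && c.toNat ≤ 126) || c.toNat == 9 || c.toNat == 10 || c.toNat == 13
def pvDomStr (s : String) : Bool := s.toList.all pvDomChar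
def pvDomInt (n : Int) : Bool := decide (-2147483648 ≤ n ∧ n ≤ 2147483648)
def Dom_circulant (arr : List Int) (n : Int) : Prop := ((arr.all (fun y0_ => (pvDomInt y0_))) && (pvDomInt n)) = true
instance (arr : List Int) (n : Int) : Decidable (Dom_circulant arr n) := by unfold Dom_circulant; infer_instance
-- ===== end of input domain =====

-- B replaces A's column-by-column shift recurrence plus final transpose with the direct
-- closed form: row i = [arr[(j - i) % n] for j in range(n)] (objective: simpler).

-- ===== PORT A =====
-- c = [[0 for i in range(n)] for j in range(n)]
def circZero (n : Int) : List (List Int) :=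
  (PySem.List.pyRange 0 n 1).map (fun _ => (PySem.List.pyRange 0 n 1).map (fun _ => (0 : Int)))

-- for k in range(n): c[k][0] = arr[k]
def circCol0 (arr : List Int) (n : Int) (c : List (List Int)) : List (List Int) :=
  (PySem.List.pyRange 0 n 1).foldl (fun c k =>
    PySem.List.pySetD c k (PySem.List.pySetD (PySem.List.pyGetD c k []) 0 (PySem.List.pyGetD arr k 0))) c

-- for j in range(n): if j-1 >= 0: c[j][i] = c[j-1][i-1] else: c[j][i] = c[n-1][i-1]
def circShift (n : Int) (c : List (List Int)) (i : Int) : List (List Int) :=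
  (PySem.List.pyRange 0 n 1).foldl (fun c j =>
    if j - 1 ≥ 0 then
      PySem.List.pySetD c j (PySem.List.pySetD (PySem.List.pyGetD c j []) i
        (PySem.List.pyGetD (PySem.List.pyGetD c (j - 1) []) (i - 1) 0))
    else
      PySem.List.pySetD c j (PySem.List.pySetD (PySem.List.pyGetD c j []) i
        (PySem.List.pyGetD (PySem.List.pyGetD c (n - 1) []) (i - 1) 0))) c

def circulant (arr : List Int) (n : Int) : List (List Int) :=
  let c := (PySem.List.pyRange 1 n 1).foldl (circShift n) (circCol0 arr n (circZero n))
  -- result = [[c[j][i] for j in range(len(c))] for i in range(len(c[0]))]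
  (PySem.List.pyRange 0 (PySem.List.len (PySem.List.pyGetD c 0 [])) 1).map (fun i =>
    (PySem.List.pyRange 0 (PySem.List.len c) 1).map (fun j =>
      PySem.List.pyGetD (PySem.List.pyGetD c j []) i 0))

-- ===== PORT B =====
def circulant_alt (arr : List Int) (n : Int) : List (List Int) :=
  (PySem.List.pyRange 0 n 1).map (fun i =>
    (PySem.List.pyRange 0 n 1).map (fun j =>
      PySem.List.pyGetD arr (PySem.Int.mod (j - i) n) 0))

-- ===== PRECONDITION & SPEC =====
-- A raises IndexError when n <= 0 (len(c[0]) on the empty c) and when len(arr) < n (arr[k]); Pre_ excludes exactly those.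
def Pre_circulant (arr : List Int) (n : Int) : Prop := 1 ≤ n ∧ n ≤ (arr.length : Int)
instance (arr : List Int) (n : Int) : Decidable (Pre_circulant arr n) := by unfold Pre_circulant; infer_instance
def pvWitness_circulant : List Int × Int := ([3, 1, 4], 3)

def Spec_circulant (arr : List Int) (n : Int) (out : List (List Int)) : Prop := out = circulant_alt arr n
instance (arr : List Int) (n : Int) (out : List (List Int)) : Decidable (Spec_circulant arr n out) := by unfold Spec_circulant; infer_instance

-- ===== CLAIM (what is proved, stated in full; the proofs are below) =====
def Claim_equal_circulant : Prop := ∀ (arr : List Int) (n : Int), Dom_circulant arr n → Pre_circulant arr n → Spec_circulant arr n (circulant arr n)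

-- ===== LEMMAS AND PROOFS =====

-- the common entry value: arr[(j - i) % n]
def circEntry (arr : List Int) (n : Int) (j i : Nat) : Int :=
  PySem.List.pyGetD arr (PySem.Int.mod ((j : Int) - (i : Int)) n) 0

-- Nat-land versions of A's two loop bodies
def colStep (arr : List Int) (c : List (List Int)) (k : Nat) : List (List Int) :=
  c.set k ((c.getD k []).set 0 (arr.getD k 0))

def shiftStepN (n' i : Nat) (c : List (List Int)) (j : Nat) : List (List Int) :=
  c.set j ((c.getD j []).set i ((c.getD (if j = 0 then n' - 1 else j - 1) []).getD (i - 1) 0))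

def circShape (n' : Nat) (c : List (List Int)) : Prop :=
  c.length = n' ∧ ∀ j, j < n' → (c.getD j []).length = n'

lemma getD_set_ne (c : List (List Int)) (p j : Nat) (row : List Int) (hjp : j ≠ p) :
    (c.set p row).getD j [] = c.getD j [] := by
  simp [List.getD, Ne.symm hjp]

lemma getD_set_eq (c : List (List Int)) (p : Nat) (row : List Int) (hp : p < c.length) :
    (c.set p row).getD p [] = row := by
  simp [List.getD, hp]

lemma getD_set_ne' (row : List Int) (t i : Nat) (v : Int) (hti : t ≠ i) :
    (row.set i v).getD t 0 = row.getD t 0 := by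
  simp [List.getD, Ne.symm hti]

lemma getD_set_eq' (row : List Int) (i : Nat) (v : Int) (hi : i < row.length) :
    (row.set i v).getD i 0 = v := by
  simp [List.getD, hi]

lemma circCol0_eq (arr : List Int) (n : Int) (c : List (List Int)) :
    circCol0 arr n c = (List.range n.toNat).foldl (colStep arr) c := by
  unfold circCol0 colStep
  rw [PySem.List.pyRange_zero, List.foldl_map]
  apply PySem.List.foldl_congr_mem
  intro c' k _
  simp [pysem]

lemma circShift_eq (n : Int) (hn : 0 < n) (c : List (List Int)) (i : Nat) (hi : 1 ≤ i) :
    circShift n c ↑i = (List.range n.toNat).foldl (shiftStepN n.toNat i) c := by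
  unfold circShift shiftStepN
  rw [PySem.List.pyRange_zero, List.foldl_map]
  apply PySem.List.foldl_congr_mem
  intro c' j _
  by_cases h0 : j = 0
  · subst h0
    have hcond : ¬ ((0:Int) - 1 ≥ 0) := by norm_num
    have hn1 : (n - 1 : Int) = ((n.toNat - 1 : Nat) : Int) := by omega
    have hi1 : ((i:Int) - 1) = ((i - 1 : Nat) : Int) := by omega
    simp only [Nat.cast_zero, if_neg hcond]
    rw [hn1, hi1]
    simp [pysem]
  · have h1 : ((j:Int) - 1 ≥ 0) := by omega
    have hj1 : ((j:Int) - 1) = ((j - 1 : Nat) : Int) := by omega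
    have hi1 : ((i:Int) - 1) = ((i - 1 : Nat) : Int) := by omega
    rw [if_pos h1, hj1, hi1, if_neg h0]
    simp [pysem]

lemma circShape_zero (n : Int) : circShape n.toNat (circZero n) := by
  unfold circShape circZero
  rw [PySem.List.pyRange_zero]
  constructor
  · simp
  · intro j hj
    simp [List.getD, List.getElem?_map, List.getElem?_range hj]

-- the first loop: after it, column 0 of every row is arr[j], shape preserved
lemma col0_fold_inv (arr : List Int) (n' : Nat) (c : List (List Int)) (hc : circShape n' c)
    (p : Nat) (hp : p ≤ n') :
    circShape n' ((List.range p).foldl (colStep arr) c) ∧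
    (∀ j, j < p → (((List.range p).foldl (colStep arr) c).getD j []).getD 0 0 = arr.getD j 0) := by
  induction p with
  | zero => exact ⟨hc, fun j hj => absurd hj (Nat.not_lt_zero j)⟩
  | succ p ih =>
    obtain ⟨⟨hlen, hrow⟩, hdone⟩ := ih (by omega)
    set c' := (List.range p).foldl (colStep arr) c with hc'
    have hstep : (List.range (p+1)).foldl (colStep arr) c = colStep arr c' p := by
      rw [List.range_succ, List.foldl_append, List.foldl_cons, List.foldl_nil]
    rw [hstep]
    have hpn : p < n' := by omega
    have hplen : p < c'.length := by omega
    unfold colStep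
    refine ⟨⟨by simp [hlen], ?_⟩, ?_⟩
    · intro j hj
      by_cases hjp : j = p
      · subst hjp
        rw [getD_set_eq _ _ _ hplen, List.length_set]
        exact hrow j hpn
      · rw [getD_set_ne _ _ _ _ hjp]; exact hrow j hj
    · intro j hj
      by_cases hjp : j = p
      · subst hjp
        rw [getD_set_eq _ _ _ hplen, getD_set_eq' _ _ _ (by rw [hrow j hpn]; omega)]
      · rw [getD_set_ne _ _ _ _ hjp]; exact hdone j (by omega)

-- the inner loop of the second phase, at column i
lemma shift_fold_inv (n' i : Nat) (hi : 1 ≤ i) (hin : i < n') (c : List (List Int))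
    (hc : circShape n' c) (p : Nat) (hp : p ≤ n') :
    circShape n' ((List.range p).foldl (shiftStepN n' i) c) ∧
    (∀ j t, j < n' → t ≠ i →
      (((List.range p).foldl (shiftStepN n' i) c).getD j []).getD t 0 = (c.getD j []).getD t 0) ∧
    (∀ j, p ≤ j → j < n' →
      (((List.range p).foldl (shiftStepN n' i) c).getD j []).getD i 0 = (c.getD j []).getD i 0) ∧
    (∀ j, j < p →
      (((List.range p).foldl (shiftStepN n' i) c).getD j []).getD i 0
        = (c.getD (if j = 0 then n' - 1 else j - 1) []).getD (i - 1) 0) := by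
  induction p with
  | zero =>
    exact ⟨hc, fun _ _ _ _ => rfl, fun _ _ _ => rfl, fun j hj => absurd hj (Nat.not_lt_zero j)⟩
  | succ p ih =>
    obtain ⟨⟨hlen, hrow⟩, hother, hhigh, hdone⟩ := ih (by omega)
    set c' := (List.range p).foldl (shiftStepN n' i) c with hc'
    have hstep : (List.range (p+1)).foldl (shiftStepN n' i) c = shiftStepN n' i c' p := by
      rw [List.range_succ, List.foldl_append, List.foldl_cons, List.foldl_nil]
    rw [hstep]
    have hpn : p < n' := by omega
    have hplen : p < c'.length := by omega
    have hprevn : (if p = 0 then n' - 1 else p - 1) < n' := by split <;> omega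
    unfold shiftStepN
    have hrowp : (c'.getD p []).length = n' := hrow p hpn
    constructor
    · constructor
      · simp [hlen]
      · intro j hj
        by_cases hjp : j = p
        · subst hjp
          rw [getD_set_eq _ _ _ hplen, List.length_set]
          exact hrowp
        · rw [getD_set_ne _ _ _ _ hjp]; exact hrow j hj
    refine ⟨?_, ?_, ?_⟩
    · intro j t hj hti
      by_cases hjp : j = p
      · subst hjp
        rw [getD_set_eq _ _ _ hplen, getD_set_ne' _ _ _ _ hti]
        exact hother j t hpn hti
      · rw [getD_set_ne _ _ _ _ hjp]; exact hother j t hj hti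
    · intro j hj1 hj2
      have hjp : j ≠ p := by omega
      rw [getD_set_ne _ _ _ _ hjp]; exact hhigh j (by omega) hj2
    · intro j hj
      by_cases hjp : j = p
      · subst hjp
        rw [getD_set_eq _ _ _ hplen, getD_set_eq' _ _ _ (by rw [hrowp]; omega)]
        exact hother _ _ hprevn (by omega)
      · rw [getD_set_ne _ _ _ _ hjp]; exact hdone j (by omega)

-- entry arithmetic
lemma circEntry_zero (arr : List Int) (n : Int) (j : Nat) (hj : (j : Int) < n) :
    circEntry arr n j 0 = arr.getD j 0 := by
  unfold circEntry
  have hn : 0 < n := by omega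
  rw [PySem.Int.mod_eq_emod_of_pos hn]
  have : ((j : Int) - (0:Nat)) = (j : Int) := by push_cast; ring
  rw [this, Int.emod_eq_of_lt (by positivity) hj]
  simp [pysem]

lemma circEntry_shift (arr : List Int) (n : Int) (hn : 0 < n) (j i : Nat)
    (hi : 1 ≤ i) (hj : j < n.toNat) (hin : i < n.toNat) :
    circEntry arr n (if j = 0 then n.toNat - 1 else j - 1) (i - 1) = circEntry arr n j i := by
  unfold circEntry
  congr 1
  by_cases h0 : j = 0
  · subst h0
    have h1 : ((if (0:Nat) = 0 then n.toNat - 1 else 0 - 1 : Nat) : Int) - ((i - 1 : Nat) : Int)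
        = ((0:Nat) : Int) - (i : Int) + 1 * n := by simp; omega
    rw [h1, PySem.Int.mod_eq_emod_of_pos hn, PySem.Int.mod_eq_emod_of_pos hn,
      Int.add_mul_emod_self_right]
  · have h1 : ((if j = 0 then n.toNat - 1 else j - 1 : Nat) : Int) - ((i - 1 : Nat) : Int)
        = (j : Int) - (i : Int) := by rw [if_neg h0]; omega
    rw [h1]

-- A's final matrix c, named (the let-body of circulant; definitional)
def cFinal (arr : List Int) (n : Int) : List (List Int) :=
  (PySem.List.pyRange 1 n 1).foldl (circShift n) (circCol0 arr n (circZero n))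

lemma circulant_unfold (arr : List Int) (n : Int) :
    circulant arr n =
      (PySem.List.pyRange 0 (PySem.List.len (PySem.List.pyGetD (cFinal arr n) 0 [])) 1).map (fun i =>
        (PySem.List.pyRange 0 (PySem.List.len (cFinal arr n)) 1).map (fun j =>
          PySem.List.pyGetD (PySem.List.pyGetD (cFinal arr n) j []) i 0)) := rfl

-- A's matrix c after both loops: the "good up to column m" invariant
def circGood (arr : List Int) (n : Int) (n' m : Nat) (c : List (List Int)) : Prop :=
  circShape n' c ∧ ∀ j t, j < n' → t ≤ m → (c.getD j []).getD t 0 = circEntry arr n j t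

lemma circGood_col0 (arr : List Int) (n : Int) (hn : 0 < n) :
    circGood arr n n.toNat 0 (circCol0 arr n (circZero n)) := by
  rw [circCol0_eq]
  obtain ⟨hshape, hcol⟩ :=
    col0_fold_inv arr n.toNat (circZero n) (circShape_zero n) n.toNat (le_refl _)
  refine ⟨hshape, ?_⟩
  intro j t hj ht
  have ht0 : t = 0 := by omega
  subst ht0
  rw [hcol j hj, circEntry_zero arr n j (by omega)]

lemma circGood_shift (arr : List Int) (n : Int) (i : Nat) (hi : 1 ≤ i) (hin : i < n.toNat)
    (c : List (List Int)) (hg : circGood arr n n.toNat (i - 1) c) :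
    circGood arr n n.toNat i (circShift n c ↑i) := by
  obtain ⟨hshape, hval⟩ := hg
  rw [circShift_eq n (by omega) c i hi]
  obtain ⟨hshape', hother, _, hdone⟩ :=
    shift_fold_inv n.toNat i hi hin c hshape n.toNat (le_refl _)
  refine ⟨hshape', ?_⟩
  intro j t hj ht
  by_cases hti : t = i
  · subst hti
    rw [hdone j hj]
    have hprevn : (if j = 0 then n.toNat - 1 else j - 1) < n.toNat := by split <;> omega
    rw [hval _ _ hprevn (le_refl _), circEntry_shift arr n (by omega) j t hi hj hin]
  · rw [hother j t hj hti, hval j t hj (by omega)]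

lemma circGood_final (arr : List Int) (n : Int) (hn : 0 < n) :
    circGood arr n n.toNat (n.toNat - 1) (cFinal arr n) := by
  unfold cFinal
  rw [PySem.List.pyRange_one, List.foldl_map]
  have hkey : ∀ m : Nat, m ≤ n.toNat - 1 →
      circGood arr n n.toNat m
        ((List.range m).foldl (fun c (k : Nat) => circShift n c (1 + (k : Int)))
          (circCol0 arr n (circZero n))) := by
    intro m
    induction m with
    | zero => intro _; exact circGood_col0 arr n hn
    | succ m ih =>
      intro hm
      rw [List.range_succ, List.foldl_append, List.foldl_cons, List.foldl_nil]
      have hcast : (1 + (m : Int)) = ((m + 1 : Nat) : Int) := by push_cast; ring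
      rw [hcast]
      have := circGood_shift arr n (m + 1) (by omega) (by omega) _
        (by simpa using ih (by omega))
      simpa using this
  have := hkey (n.toNat - 1) (le_refl _)
  have hlen : (n - 1).toNat = n.toNat - 1 := by omega
  rw [hlen]
  exact this

-- both sides as an explicit double map over Nat ranges
lemma circulant_alt_closed (arr : List Int) (n : Int) :
    circulant_alt arr n =
      (List.range n.toNat).map (fun i => (List.range n.toNat).map (fun j => circEntry arr n j i)) := by
  unfold circulant_alt circEntry
  rw [PySem.List.pyRange_zero]
  simp [List.map_map, Function.comp]

-- ===== VERDICT (by name: the statement is the Claim_ definition above) =====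
theorem circulant_spec : Claim_equal_circulant := by
  intro arr n _ hpre
  obtain ⟨hn, hlen⟩ := hpre
  unfold Spec_circulant
  rw [circulant_unfold]
  obtain ⟨⟨hclen, hrow⟩, hval⟩ := circGood_final arr n (by omega)
  set c := cFinal arr n with hc
  have h0n : 0 < n.toNat := by omega
  have hrow0 : (PySem.List.pyGetD c 0 []).length = n.toNat := by
    rw [PySem.List.pyGetD_zero]; exact hrow 0 h0n
  have hlen1 : PySem.List.len (PySem.List.pyGetD c 0 []) = (n.toNat : Int) := by
    rw [PySem.List.len_eq, hrow0]
  have hlen2 : PySem.List.len c = (n.toNat : Int) := by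
    rw [PySem.List.len_eq, hclen]
  rw [hlen1, hlen2, circulant_alt_closed, PySem.List.pyRange_zero_nat, List.map_map]
  apply List.map_congr_left
  intro i hi
  simp only [List.mem_range] at hi
  simp only [Function.comp_apply]
  rw [List.map_map]
  apply List.map_congr_left
  intro j hj
  simp only [List.mem_range] at hj
  show PySem.List.pyGetD (PySem.List.pyGetD c ↑j []) ↑i 0 = circEntry arr n j i
  rw [PySem.List.pyGetD_natCast, PySem.List.pyGetD_natCast]
  have := hval j i hj (by omega)
  simpa [List.getD] using this
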